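-- pv_equiv track=rewrite | github.com/CaranthirLjh/Leetcode | Company/Amazon/amz-findNumWaysToSplit.py | findNumWaysToSplit
-- ===== SOURCE A (Python) =====
-- def findNumWaysToSplit(s: str, num: int) -> int:
--     l = len(s)
--     ans = 0
--     for i in range(num,l-num+1):
--         prefix = s[:i]
--         suffix = s[i:]
--         if len(set(prefix) & set(suffix))>num:
--             ans += 1
--     return ans
-- ===== SOURCE B (Python) =====
-- def findNumWaysToSplit(s: str, num: int) -> int:
--     # Precompute first/last occurrence index of each distinct char once,
--     # then count common distinct chars per split from those indices.
--     first = {}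
--     last = {}
--     for j, c in enumerate(s):
--         if c not in first:
--             first[c] = j
--         last[c] = j
--     l = len(s)
--     ans = 0
--     for i in range(num, l - num + 1):
--         common = 0
--         for c in first:
--             if first[c] < i <= last[c]:
--                 common += 1
--         if common > num:
--             ans += 1
--     return ans
-- ===== Notes on version B (the rewrite author's own statement) =====
-- stated objective: faster
-- what changed: Instead of rebuilding two character sets and intersecting them for every split point (O(l) work per split), B precomputes each distinct character's first and last occurrence index in one pass and counts a character as common at split i iff first[c] < i <= last[c], scanning only the distinct alphabet per split.
import Mathlib
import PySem

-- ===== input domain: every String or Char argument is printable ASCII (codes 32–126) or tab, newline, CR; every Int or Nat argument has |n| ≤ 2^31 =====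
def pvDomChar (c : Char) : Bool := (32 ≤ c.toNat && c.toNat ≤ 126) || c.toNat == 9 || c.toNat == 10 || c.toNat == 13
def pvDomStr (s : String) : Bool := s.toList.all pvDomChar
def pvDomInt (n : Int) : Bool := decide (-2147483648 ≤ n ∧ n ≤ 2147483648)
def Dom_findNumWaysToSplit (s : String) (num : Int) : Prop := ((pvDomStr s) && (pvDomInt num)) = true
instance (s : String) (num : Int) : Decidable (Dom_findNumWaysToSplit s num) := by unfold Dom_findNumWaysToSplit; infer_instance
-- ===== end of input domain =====

-- B replaces the per-split set intersection by precomputed first/last occurrence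
-- indices of each distinct character (one pass), for an asymptotically faster count.

-- ===== PORT A =====
def findNumWaysToSplit (s : String) (num : Int) : Int :=
  let l : Int := PySem.Str.len s
  (PySem.List.pyRange num (l - num + 1) 1).foldl
    (fun ans i =>
      let pref := PySem.List.slice s.toList none (some i)
      let suff := PySem.List.slice s.toList (some i) none
      if PySem.Set.len (PySem.Set.inter (PySem.Set.ofList pref) (PySem.Set.ofList suff)) > num
      then ans + 1 else ans)
    0

-- ===== PORT B =====
-- the first loop of Source B: build the first/last occurrence dicts
def pvBuildFL (cs : List Char) : PySem.Dict Char Int × PySem.Dict Char Int :=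
  (PySem.List.enumerate cs 0).foldl
    (fun fl jc =>
      (if fl.1.contains jc.2 then fl.1 else fl.1.insert jc.2 jc.1, fl.2.insert jc.2 jc.1))
    (PySem.Dict.empty, PySem.Dict.empty)

def findNumWaysToSplit_alt (s : String) (num : Int) : Int :=
  let fl := pvBuildFL s.toList
  let first := fl.1
  let last := fl.2
  let l : Int := PySem.Str.len s
  (PySem.List.pyRange num (l - num + 1) 1).foldl
    (fun ans i =>
      let common := first.keys.foldl
        (fun acc c => if first.getD c 0 < i ∧ i ≤ last.getD c 0 then acc + 1 else acc) (0 : Int)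
      if common > num then ans + 1 else ans)
    0

-- ===== PRECONDITION & SPEC =====
def Spec_findNumWaysToSplit (s : String) (num : Int) (out : Int) : Prop := out = findNumWaysToSplit_alt s num
instance (s : String) (num : Int) (out : Int) : Decidable (Spec_findNumWaysToSplit s num out) := by unfold Spec_findNumWaysToSplit; infer_instance

-- ===== CLAIM (what is proved, stated in full; the proofs are below) =====
def Claim_equal_findNumWaysToSplit : Prop := ∀ (s : String) (num : Int), Dom_findNumWaysToSplit s num → Spec_findNumWaysToSplit s num (findNumWaysToSplit s num)

-- ===== LEMMAS AND PROOFS =====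

-- first occurrence index of c in cs (as an Int), if any
def pvFidx? (cs : List Char) (c : Char) : Option Int :=
  match cs with
  | [] => none
  | d :: tl => if d = c then some 0 else (pvFidx? tl c).map (· + 1)

-- last occurrence index of c in cs (as an Int), if any
def pvLidx? (cs : List Char) (c : Char) : Option Int :=
  match cs with
  | [] => none
  | d :: tl =>
    match pvLidx? tl c with
    | some j => some (j + 1)
    | none => if d = c then some 0 else none

theorem pvFidx?_isSome (cs : List Char) (c : Char) : (pvFidx? cs c).isSome = true ↔ c ∈ cs := by
  induction cs with
  | nil => simp [pvFidx?]
  | cons d tl ih =>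
    by_cases h : d = c
    · simp [pvFidx?, h]
    · simp only [pvFidx?, if_neg h, List.mem_cons, Option.isSome_map, ih]
      constructor
      · exact Or.inr
      · rintro (hc | hc)
        · exact absurd hc.symm h
        · exact hc

theorem pvLidx?_isSome (cs : List Char) (c : Char) : (pvLidx? cs c).isSome = true ↔ c ∈ cs := by
  induction cs with
  | nil => simp [pvLidx?]
  | cons d tl ih =>
    cases htl : pvLidx? tl c with
    | some j =>
      simp only [pvLidx?, htl, Option.isSome_some, true_iff, List.mem_cons]
      right; rw [← ih]; simp [htl]
    | none =>
      have htl' : c ∉ tl := by rw [← ih]; simp [htl]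
      by_cases h : d = c
      · simp [pvLidx?, htl, h]
      · simp only [pvLidx?, htl, if_neg h, List.mem_cons]
        constructor
        · intro hc; simp at hc
        · rintro (hc | hc)
          · exact absurd hc.symm h
          · exact absurd hc htl'

theorem pvFidx?_nonneg {cs : List Char} {c : Char} {j : Int} (h : pvFidx? cs c = some j) : 0 ≤ j := by
  induction cs generalizing j with
  | nil => simp [pvFidx?] at h
  | cons d tl ih =>
    by_cases hd : d = c
    · simp only [pvFidx?, if_pos hd] at h
      injection h with h'
      omega
    · cases hf : pvFidx? tl c with
      | none => simp [pvFidx?, if_neg hd, hf] at h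
      | some j' =>
        simp only [pvFidx?, if_neg hd, hf, Option.map_some] at h
        injection h with h'
        have := ih hf
        omega

theorem pvLidx?_nonneg {cs : List Char} {c : Char} {j : Int} (h : pvLidx? cs c = some j) : 0 ≤ j := by
  induction cs generalizing j with
  | nil => simp [pvLidx?] at h
  | cons d tl ih =>
    cases hf : pvLidx? tl c with
    | some j' =>
      simp only [pvLidx?, hf] at h
      injection h with h'
      have := ih hf
      omega
    | none =>
      by_cases hd : d = c
      · simp only [pvLidx?, hf, if_pos hd] at h
        injection h with h'
        omega
      · simp [pvLidx?, hf, if_neg hd] at h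

theorem pvMem_take (cs : List Char) (k : Nat) (c : Char) :
    c ∈ cs.take k ↔ ∃ j, pvFidx? cs c = some j ∧ j < (k : Int) := by
  induction cs generalizing k with
  | nil => simp [pvFidx?]
  | cons d tl ih =>
    cases k with
    | zero =>
      simp only [List.take_zero, List.not_mem_nil, false_iff]
      rintro ⟨j, hj, hlt⟩
      have := pvFidx?_nonneg hj
      omega
    | succ k =>
      simp only [List.take_succ_cons, List.mem_cons]
      by_cases h : d = c
      · simp only [pvFidx?, if_pos h]
        constructor
        · intro _; exact ⟨0, rfl, by positivity⟩
        · intro _; left; exact h.symm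
      · simp only [pvFidx?, if_neg h, ih k]
        constructor
        · rintro (hc | ⟨j, hj, hlt⟩)
          · exact absurd hc.symm h
          · exact ⟨j + 1, by simp [hj], by omega⟩
        · rintro ⟨j', hj', hlt'⟩
          cases hf : pvFidx? tl c with
          | none => simp [hf] at hj'
          | some j =>
            right
            refine ⟨j, rfl, ?_⟩
            simp [hf] at hj'
            omega

theorem pvMem_drop (cs : List Char) (k : Nat) (c : Char) :
    c ∈ cs.drop k ↔ ∃ j, pvLidx? cs c = some j ∧ (k : Int) ≤ j := by
  induction cs generalizing k with
  | nil => simp [pvLidx?]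
  | cons d tl ih =>
    cases k with
    | zero =>
      simp only [List.drop_zero]
      constructor
      · intro hc
        have hs := (pvLidx?_isSome (d :: tl) c).2 hc
        cases hl : pvLidx? (d :: tl) c with
        | none => simp [hl] at hs
        | some j => exact ⟨j, rfl, by simpa using pvLidx?_nonneg hl⟩
      · rintro ⟨j, hj, _⟩
        rw [← pvLidx?_isSome]; simp [hj]
    | succ k =>
      simp only [List.drop_succ_cons, ih k]
      constructor
      · rintro ⟨j, hj, hle⟩
        exact ⟨j + 1, by simp [pvLidx?, hj], by omega⟩
      · rintro ⟨j', hj', hle'⟩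
        cases hl : pvLidx? tl c with
        | some j =>
          simp [pvLidx?, hl] at hj'
          exact ⟨j, rfl, by omega⟩
        | none =>
          simp only [pvLidx?, hl] at hj'
          split at hj' <;> simp_all
          omega

theorem pvFidx?_append (ys : List Char) (x c : Char) :
    pvFidx? (ys ++ [x]) c =
      match pvFidx? ys c with
      | some j => some j
      | none => if x = c then some (ys.length : Int) else none := by
  induction ys with
  | nil => simp [pvFidx?]
  | cons d tl ih =>
    by_cases h : d = c
    · simp [pvFidx?, h]
    · simp only [List.cons_append, pvFidx?, if_neg h, ih]
      cases hf : pvFidx? tl c with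
      | some j => simp
      | none =>
        by_cases hx : x = c <;> simp [hx]

theorem pvLidx?_append (ys : List Char) (x c : Char) :
    pvLidx? (ys ++ [x]) c = if x = c then some (ys.length : Int) else pvLidx? ys c := by
  induction ys with
  | nil => by_cases h : x = c <;> simp [pvLidx?, h]
  | cons d tl ih =>
    simp only [List.cons_append, pvLidx?, ih]
    by_cases hx : x = c
    · simp only [if_pos hx, List.length_cons]
      push_cast
      ring_nf
    · simp only [if_neg hx]

-- invariant of the building fold
theorem pvBuildFL_spec (cs : List Char) :
    (∀ c, (pvBuildFL cs).1.get? c = pvFidx? cs c) ∧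
    (∀ c, (pvBuildFL cs).2.get? c = pvLidx? cs c) ∧
    (pvBuildFL cs).1.keys.Nodup := by
  induction cs using List.reverseRecOn with
  | nil =>
    refine ⟨fun c => ?_, fun c => ?_, ?_⟩ <;>
      simp [pvBuildFL, PySem.List.enumerate, pvFidx?, pvLidx?, PySem.Dict.get?_empty, PySem.Dict.keys_empty]
  | append_singleton ys x ih =>
    obtain ⟨ih1, ih2, ihn⟩ := ih
    have hb : pvBuildFL (ys ++ [x]) =
        (if (pvBuildFL ys).1.contains x then (pvBuildFL ys).1 else (pvBuildFL ys).1.insert x (ys.length : Int),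
         (pvBuildFL ys).2.insert x (ys.length : Int)) := by
      unfold pvBuildFL
      rw [PySem.List.enumerate_append, List.foldl_append]
      simp [PySem.List.enumerate]
    refine ⟨fun c => ?_, fun c => ?_, ?_⟩
    · rw [hb]
      by_cases hc : (pvBuildFL ys).1.contains x = true
      · simp only [if_pos hc]
        rw [ih1, pvFidx?_append]
        have hx : (pvFidx? ys x).isSome = true := by
          rw [pvFidx?_isSome]
          have := (PySem.Dict.get?_eq_none_iff_contains (pvBuildFL ys).1 x)
          rw [← pvFidx?_isSome]
          cases hf : pvFidx? ys x
          · rw [ih1] at this; simp [hf] at this; simp [this] at hc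
          · simp
        cases hf : pvFidx? ys c with
        | some j => simp
        | none =>
          by_cases hxc : x = c
          · subst hxc; simp [hf] at hx
          · simp [hxc]
      · simp only [if_neg hc]
        rw [PySem.Dict.get?_insert, ih1, pvFidx?_append]
        by_cases hxc : c = x
        · subst hxc
          have : pvFidx? ys c = none := by
            cases hf : pvFidx? ys c
            · rfl
            · have := (PySem.Dict.get?_eq_none_iff_contains (pvBuildFL ys).1 c).2 (by simpa using hc)
              rw [ih1, hf] at this; simp at this
          simp [this]
        · simp only [if_neg hxc]
          cases hf : pvFidx? ys c with
          | some j => simp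
          | none => simp [Ne.symm hxc]
    · rw [hb]
      simp only []
      rw [PySem.Dict.get?_insert, ih2, pvLidx?_append]
      by_cases hxc : c = x
      · subst hxc; simp
      · simp [hxc, Ne.symm hxc]
    · rw [hb]
      by_cases hc : (pvBuildFL ys).1.contains x = true
      · simpa [if_pos hc] using ihn
      · simp only [if_neg hc]
        rw [PySem.Dict.keys_insert_of_not_contains _ _ (by simpa using hc)]
        simp only [List.nodup_append, List.nodup_cons]
        refine ⟨ihn, by simp, ?_⟩
        intro a ha b hb
        simp only [List.mem_singleton] at hb
        subst hb
        intro hab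
        rw [hab] at ha
        exact hc ((PySem.Dict.contains_iff_mem_keys _ _).2 ha)

-- keys of first = the distinct chars of cs
theorem pvMem_keys (cs : List Char) (c : Char) : c ∈ (pvBuildFL cs).1.keys ↔ c ∈ cs := by
  rw [← PySem.Dict.contains_iff_mem_keys, ← pvFidx?_isSome cs c]
  obtain ⟨h1, _, _⟩ := pvBuildFL_spec cs
  have := PySem.Dict.get?_eq_none_iff_contains (pvBuildFL cs).1 c
  rw [h1] at this
  cases hf : pvFidx? cs c <;> simp [hf] at this ⊢ <;> simp [this]

-- a counting foldl is a countP
theorem pvFoldl_count {α : Type} (p : α → Prop) [DecidablePred p] (l : List α) (init : Int) :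
    l.foldl (fun acc c => if p c then acc + 1 else acc) init
      = init + (l.countP (fun c => decide (p c)) : Int) := by
  induction l generalizing init with
  | nil => simp
  | cons d tl ih =>
    by_cases h : p d <;> simp [h, ih] <;> ring

-- the per-split counts agree (for a split index inside the string)
theorem pvCommon_eq (cs : List Char) (i : Int) (h0 : 0 ≤ i) (_hl : i ≤ (cs.length : Int)) :
    PySem.Set.len (PySem.Set.inter (PySem.Set.ofList (cs.take i.toNat)) (PySem.Set.ofList (cs.drop i.toNat)))
      = ((pvBuildFL cs).1.keys.countP
          (fun c => decide ((pvBuildFL cs).1.getD c 0 < i ∧ i ≤ (pvBuildFL cs).2.getD c 0)) : Int) := by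
  obtain ⟨h1, h2, hn⟩ := pvBuildFL_spec cs
  have hk : (i.toNat : Int) = i := Int.toNat_of_nonneg h0
  -- both counted lists are Nodup with the same members, hence a Perm, hence equal length
  have hperm :
      (PySem.Set.inter (PySem.Set.ofList (cs.take i.toNat)) (PySem.Set.ofList (cs.drop i.toNat))).Perm
        ((pvBuildFL cs).1.keys.filter
          (fun c => decide ((pvBuildFL cs).1.getD c 0 < i ∧ i ≤ (pvBuildFL cs).2.getD c 0))) := by
    rw [List.perm_ext_iff_of_nodup
      (PySem.Set.nodup_inter _ _ (PySem.Set.nodup_ofList _)) (hn.filter _)]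
    intro c
    rw [PySem.Set.mem_inter, PySem.Set.mem_ofList, PySem.Set.mem_ofList, List.mem_filter]
    rw [pvMem_take, pvMem_drop, pvMem_keys]
    simp only [PySem.Dict.getD_eq_get?_getD, h1, h2, hk, decide_eq_true_eq]
    constructor
    · rintro ⟨⟨j, hj, hjlt⟩, ⟨j', hj', hj'ge⟩⟩
      refine ⟨?_, ?_, ?_⟩
      · rw [← pvFidx?_isSome]; simp [hj]
      · simp [hj, hjlt]
      · simp [hj', hj'ge]
    · rintro ⟨hmem, hlt, hge⟩
      have hf := (pvFidx?_isSome cs c).2 hmem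
      have hg := (pvLidx?_isSome cs c).2 hmem
      cases hfj : pvFidx? cs c with
      | none => simp [hfj] at hf
      | some j =>
        cases hgj : pvLidx? cs c with
        | none => simp [hgj] at hg
        | some j' =>
          rw [hfj] at hlt; rw [hgj] at hge
          exact ⟨⟨j, rfl, by simpa using hlt⟩, ⟨j', rfl, by simpa using hge⟩⟩
  rw [PySem.Set.len, hperm.length_eq, List.countP_eq_length_filter]

-- ===== VERDICT (by name: the statement is the Claim_ definition above) =====
theorem findNumWaysToSplit_spec : Claim_equal_findNumWaysToSplit := by
  intro s num _
  unfold Spec_findNumWaysToSplit findNumWaysToSplit findNumWaysToSplit_alt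
  simp only []
  apply PySem.List.foldl_congr_mem
  intro acc i hi
  rw [PySem.List.mem_pyRange_one] at hi
  congr 1
  -- the two per-split conditions are equal
  rw [pvFoldl_count]
  by_cases hnum : 0 ≤ num
  · -- the split index lies inside the string: the counts are equal
    have h0 : 0 ≤ i := le_trans hnum hi.1
    have hl : i ≤ PySem.Str.len s := by
      have := hi.2
      omega
    have hls : PySem.Str.len s = (s.toList.length : Int) := by
      simp [PySem.Str.len]
    rw [PySem.List.slice_to _ h0, PySem.List.slice_from _ h0]
    rw [pvCommon_eq s.toList i h0 (by rw [← hls]; exact hl)]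
    simp
  · -- num < 0: both counts are ≥ 0 > num, so both conditions hold
    have hA : 0 ≤ PySem.Set.len (PySem.Set.inter
        (PySem.Set.ofList (PySem.List.slice s.toList none (some i)))
        (PySem.Set.ofList (PySem.List.slice s.toList (some i) none))) := by
      rw [PySem.Set.len]; positivity
    have hB : (0 : Int) ≤ (0 : Int) + ((((pvBuildFL s.toList).1.keys.countP
        (fun c => decide ((pvBuildFL s.toList).1.getD c 0 < i ∧ i ≤ (pvBuildFL s.toList).2.getD c 0))) : Nat) : Int) := by
      positivity
    apply propext
    constructor
    · intro _; omega
    · intro _; omega
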